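-- pv_equiv track=rewrite | github.com/arjwonderful/OperationsInPyCuda | CPU.py | initialize_host_message
-- ===== SOURCE A (Python) =====
-- def initialize_host_message(msg):
--     """
--     Initilizes array from string, tracking letters, capitalization
--     and punctuation.
--     """
--     message = []
--     punctuation = []
--     upper_case = []
--
--     for i in range(0,len(msg)):
--         if msg[i].isalpha():
--             if msg[i].isupper():#catch upper case
--                upper_case.append(i)
--
--             message.append((ord(msg[i].lower()) - 97) % 26)
--         else:#catch punctuation
--             punctuation.append((i, msg[i]))
--
--     return message, punctuation, upper_case
-- ===== SOURCE B (Python) =====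
-- def initialize_host_message(msg):
--     """Divide and conquer: split the string in half, solve each half with
--     absolute indices, concatenate the three per-half result lists."""
--     def go(lo, hi):
--         if hi - lo <= 1:
--             if lo == hi:
--                 return [], [], []
--             c = msg[lo]
--             if c.isalpha():
--                 return [(ord(c.lower()) - 97) % 26], [], ([lo] if c.isupper() else [])
--             return [], [(lo, c)], []
--         mid = (lo + hi) // 2
--         m1, p1, u1 = go(lo, mid)
--         m2, p2, u2 = go(mid, hi)
--         return m1 + m2, p1 + p2, u1 + u2
--     return go(0, len(msg))
-- ===== Notes on version B (the rewrite author's own statement) =====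
-- stated objective: alternative
-- what changed: A's single left-to-right loop threading three accumulators is replaced by a balanced divide-and-conquer recursion that splits the string in half, solves each half independently, and concatenates the three per-half result lists.
import Mathlib
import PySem

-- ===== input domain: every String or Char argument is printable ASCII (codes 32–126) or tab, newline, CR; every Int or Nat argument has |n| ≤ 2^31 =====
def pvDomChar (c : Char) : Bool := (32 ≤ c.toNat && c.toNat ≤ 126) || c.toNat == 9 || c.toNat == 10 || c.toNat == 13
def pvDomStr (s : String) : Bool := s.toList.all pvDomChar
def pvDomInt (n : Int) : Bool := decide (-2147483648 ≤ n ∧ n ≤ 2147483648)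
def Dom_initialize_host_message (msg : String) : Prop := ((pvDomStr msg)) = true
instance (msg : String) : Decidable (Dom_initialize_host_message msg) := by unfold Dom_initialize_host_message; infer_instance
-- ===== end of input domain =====

-- B replaces A's single left-to-right loop with three accumulators by a balanced divide-and-conquer
-- recursion that solves each half independently and concatenates the results (objective: alternative).

-- ===== PORT A =====
-- single for-loop over range(0, len(msg)), appending into three accumulators
def initialize_host_message (msg : String) : List Int × (List (Int × String)) × List Int :=
  let cs := msg.toList
  (PySem.List.pyRange 0 (PySem.Str.len msg) 1).foldl
    (fun (acc : List Int × List (Int × String) × List Int) i =>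
      let c := PySem.List.pyGetD cs i ' '   -- msg[i]; 0 ≤ i < len so the default is never used
      if PySem.Chars.isalpha c then
        let upper_case := if PySem.Chars.isupper c then acc.2.2 ++ [i] else acc.2.2
        (acc.1 ++ [PySem.Int.mod (((PySem.Chars.lowerChar c).toNat : Int) - 97) 26], acc.2.1, upper_case)
      else
        (acc.1, acc.2.1 ++ [(i, String.ofList [c])], acc.2.2))
    ([], [], [])

-- ===== PORT B =====
-- divide and conquer on the character list; `lo` is the absolute index of the first character.
-- Python's go(lo, hi) works on msg[lo:hi]; here that slice is the list argument and
-- mid = (lo+hi)//2 corresponds to splitting the list at length/2 (exact: (2*lo+len)//2 - lo = len/2).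
def ihmGo (cs : List Char) (lo : Int) : List Int × (List (Int × String)) × List Int :=
  if h : cs.length ≤ 1 then
    match cs with
    | [] => ([], [], [])
    | c :: _ =>
      if PySem.Chars.isalpha c then
        ([PySem.Int.mod (((PySem.Chars.lowerChar c).toNat : Int) - 97) 26], [],
         if PySem.Chars.isupper c then [lo] else [])
      else
        ([], [(lo, String.ofList [c])], [])
  else
    let k := cs.length / 2
    let L := ihmGo (cs.take k) lo
    let R := ihmGo (cs.drop k) (lo + (k : Int))
    (L.1 ++ R.1, L.2.1 ++ R.2.1, L.2.2 ++ R.2.2)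
termination_by cs.length
decreasing_by
  · simp only [List.length_take]; omega
  · simp only [List.length_drop]; omega

def initialize_host_message_alt (msg : String) : List Int × (List (Int × String)) × List Int :=
  ihmGo msg.toList 0

-- ===== PRECONDITION & SPEC =====
def Spec_initialize_host_message (msg : String) (out : List Int × (List (Int × String)) × List Int) : Prop := out = initialize_host_message_alt msg
instance (msg : String) (out : List Int × (List (Int × String)) × List Int) : Decidable (Spec_initialize_host_message msg out) := by unfold Spec_initialize_host_message; infer_instance

-- ===== CLAIM (what is proved, stated in full; the proofs are below) =====
def Claim_equal_initialize_host_message : Prop := ∀ (msg : String), Dom_initialize_host_message msg → Spec_initialize_host_message msg (initialize_host_message msg)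

-- ===== LEMMAS AND PROOFS =====

-- closed-form characterization both ports are reduced to
def ihmSpec (cs : List Char) (s : Int) : List Int × (List (Int × String)) × List Int :=
  ((cs.filter PySem.Chars.isalpha).map (fun c => PySem.Int.mod (((PySem.Chars.lowerChar c).toNat : Int) - 97) 26),
   ((PySem.List.enumerate cs s).filter (fun p => !PySem.Chars.isalpha p.2)).map (fun p => (p.1, String.ofList [p.2])),
   ((PySem.List.enumerate cs s).filter (fun p => PySem.Chars.isalpha p.2 && PySem.Chars.isupper p.2)).map (fun p => p.1))

lemma ihmSpec_append (l r : List Char) (s : Int) :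
    ihmSpec (l ++ r) s =
      ((ihmSpec l s).1 ++ (ihmSpec r (s + l.length)).1,
       (ihmSpec l s).2.1 ++ (ihmSpec r (s + l.length)).2.1,
       (ihmSpec l s).2.2 ++ (ihmSpec r (s + l.length)).2.2) := by
  simp [ihmSpec, PySem.List.enumerate_append, List.filter_append, List.map_append]

lemma ihmGo_eq_spec (cs : List Char) (lo : Int) : ihmGo cs lo = ihmSpec cs lo := by
  fun_induction ihmGo cs lo with
  | case1 lo h1 h2 =>
      simp [ihmSpec, PySem.List.enumerate_nil]
  | case2 lo c t h1 ha h2 =>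
      have ht : t = [] := by
        simp only [List.length_cons] at h1
        exact List.eq_nil_of_length_eq_zero (by omega)
      subst ht
      by_cases hu : PySem.Chars.isupper c = true
      · simp [ihmSpec, PySem.List.enumerate_cons, PySem.List.enumerate_nil, ha, hu]
      · simp [ihmSpec, PySem.List.enumerate_cons, PySem.List.enumerate_nil, ha, hu]
  | case3 lo c t h1 ha h2 =>
      have ht : t = [] := by
        simp only [List.length_cons] at h1
        exact List.eq_nil_of_length_eq_zero (by omega)
      subst ht
      simp [ihmSpec, PySem.List.enumerate_cons, PySem.List.enumerate_nil, ha]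
  | case4 cs lo h k L R =>
      rename_i ihT ihD
      have hL : L = ihmSpec (cs.take k) lo := by
        rw [show L = ihmGo (cs.take k) lo from rfl, ihT]
      have hR : R = ihmSpec (cs.drop k) (lo + (k : Int)) := by
        rw [show R = ihmGo (cs.drop k) (lo + (k : Int)) from rfl, ihD]
      have hk2 : (cs.take k).length = k := by rw [List.length_take]; omega
      calc (L.1 ++ R.1, L.2.1 ++ R.2.1, L.2.2 ++ R.2.2)
          = ((ihmSpec (cs.take k) lo).1 ++ (ihmSpec (cs.drop k) (lo + (k : Int))).1,
             (ihmSpec (cs.take k) lo).2.1 ++ (ihmSpec (cs.drop k) (lo + (k : Int))).2.1,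
             (ihmSpec (cs.take k) lo).2.2 ++ (ihmSpec (cs.drop k) (lo + (k : Int))).2.2) := by
            rw [hL, hR]
        _ = ihmSpec cs lo := by
            conv_rhs => rw [← List.take_append_drop k cs, ihmSpec_append]
            rw [hk2]

-- the loop body of port A, viewed as a step on (index, char) pairs
def ihmStep (acc : List Int × List (Int × String) × List Int) (q : Int × Char) :
    List Int × List (Int × String) × List Int :=
  if PySem.Chars.isalpha q.2 then
    let upper_case := if PySem.Chars.isupper q.2 then acc.2.2 ++ [q.1] else acc.2.2
    (acc.1 ++ [PySem.Int.mod (((PySem.Chars.lowerChar q.2).toNat : Int) - 97) 26], acc.2.1, upper_case)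
  else
    (acc.1, acc.2.1 ++ [(q.1, String.ofList [q.2])], acc.2.2)

lemma ihm_fold_enumerate (cs : List Char) (s : Int)
    (m : List Int) (p : List (Int × String)) (u : List Int) :
    (PySem.List.enumerate cs s).foldl ihmStep (m, p, u)
    = (m ++ (ihmSpec cs s).1, p ++ (ihmSpec cs s).2.1, u ++ (ihmSpec cs s).2.2) := by
  induction cs generalizing s m p u with
  | nil => simp [ihmSpec, PySem.List.enumerate_nil]
  | cons c cs ih =>
    rw [PySem.List.enumerate_cons]
    by_cases ha : PySem.Chars.isalpha c = true
    · by_cases hu : PySem.Chars.isupper c = true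
      · simp [List.foldl_cons, ihmStep, ihmSpec, PySem.List.enumerate_cons, ha, hu, ih]
      · simp [List.foldl_cons, ihmStep, ihmSpec, PySem.List.enumerate_cons, ha, hu, ih]
    · simp [List.foldl_cons, ihmStep, ihmSpec, PySem.List.enumerate_cons, ha, ih]

-- ===== VERDICT (by name: the statement is the Claim_ definition above) =====
theorem initialize_host_message_spec : Claim_equal_initialize_host_message := by
  intro msg _
  unfold Spec_initialize_host_message
  have h1 : initialize_host_message msg
      = (PySem.List.enumerate msg.toList 0).foldl ihmStep ([], [], []) := by
    show (PySem.List.pyRange 0 (PySem.List.len msg.toList) 1).foldl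
        (fun acc i => ihmStep acc (i, PySem.List.pyGetD msg.toList i ' ')) ([], [], []) = _
    rw [PySem.List.enumerate_eq_map_pyRange msg.toList ' ', List.foldl_map]
  rw [h1, ihm_fold_enumerate]
  show (([] : List Int) ++ _, ([] : List (Int × String)) ++ _, ([] : List Int) ++ _)
      = initialize_host_message_alt msg
  rw [initialize_host_message_alt, ihmGo_eq_spec]
  simp
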